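-- pv_equiv track=rewrite | github.com/shahrukhx01/dsa-leetcode | leetcode/easy/2315_Count_Asterisks.py | countAsterisks
-- ===== SOURCE A (Python) =====
-- def countAsterisks(s: str) -> int:
--     lst = []
--     asterics = 0
--     for char in s:
--         if char == "|" and char not in lst:
--             lst.append(char)
--         elif char == "|" and char in lst:
--             lst = []
--         elif "|" in lst:
--             lst.append(char)
--         elif char == "*":
--             asterics += 1
--
--     return asterics
-- ===== SOURCE B (Python) =====
-- def countAsterisks(s: str) -> int:
--     return sum(p.count("*") for i, p in enumerate(s.split("|")) if i % 2 == 0)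
-- ===== Notes on version B (the rewrite author's own statement) =====
-- stated objective: faster
-- what changed: Instead of A's stateful character scan with a growing list and linear membership tests, B splits the string at the bar characters into segments and sums the asterisk-counts of the even-indexed (outside-bars) segments.
import Mathlib
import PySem

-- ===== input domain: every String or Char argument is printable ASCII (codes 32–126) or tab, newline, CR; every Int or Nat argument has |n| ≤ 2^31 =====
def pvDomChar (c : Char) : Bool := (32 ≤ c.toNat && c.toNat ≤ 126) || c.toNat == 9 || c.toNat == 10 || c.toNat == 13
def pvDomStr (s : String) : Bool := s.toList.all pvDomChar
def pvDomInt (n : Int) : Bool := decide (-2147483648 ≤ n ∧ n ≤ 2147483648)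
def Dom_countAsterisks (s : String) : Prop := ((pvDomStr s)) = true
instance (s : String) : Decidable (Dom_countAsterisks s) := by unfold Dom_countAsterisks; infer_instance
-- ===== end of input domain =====

-- B replaces A's stateful scan (growing list with membership tests) by splitting at the
-- bar characters and summing asterisk-counts of the even-indexed segments (measured faster).

-- ===== PORT A =====
-- loop over the chars of s with A's state: the list `lst` and the counter `asterics`
def countAsterisksLoopA : List Char → List Char → Int → Int
  | [], _, asterics => asterics
  | c :: rest, lst, asterics =>
    if c = '|' ∧ c ∉ lst then countAsterisksLoopA rest (lst ++ [c]) asterics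
    else if c = '|' ∧ c ∈ lst then countAsterisksLoopA rest [] asterics
    else if '|' ∈ lst then countAsterisksLoopA rest (lst ++ [c]) asterics
    else if c = '*' then countAsterisksLoopA rest lst (asterics + 1)
    else countAsterisksLoopA rest lst asterics

def countAsterisks (s : String) : Int := countAsterisksLoopA s.toList [] 0

-- ===== PORT B =====
-- sum(p.count("*") for i, p in enumerate(s.split("|")) if i % 2 == 0)
def countAsterisks_alt (s : String) : Int :=
  (((PySem.List.enumerate (PySem.Chars.splitOn s.toList ['|']) 0).filter
      (fun q => q.1 % 2 == 0)).map
      (fun q => (PySem.Chars.count q.2 ['*'] : Int))).sum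

-- ===== PRECONDITION & SPEC =====
def Spec_countAsterisks (s : String) (out : Int) : Prop := out = countAsterisks_alt s
instance (s : String) (out : Int) : Decidable (Spec_countAsterisks s out) := by unfold Spec_countAsterisks; infer_instance

-- ===== CLAIM (what is proved, stated in full; the proofs are below) =====
def Claim_equal_countAsterisks : Prop := ∀ (s : String), Dom_countAsterisks s → Spec_countAsterisks s (countAsterisks s)

-- ===== LEMMAS AND PROOFS =====

-- a boolean-toggle scan, the intermediate form both ports are related to
def countAsterisksLoopB : List Char → Bool → Int → Int
  | [], _, count => count
  | c :: rest, inside, count =>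
    if c = '|' then countAsterisksLoopB rest (!inside) count
    else if c = '*' ∧ inside = false then countAsterisksLoopB rest inside (count + 1)
    else countAsterisksLoopB rest inside count

-- structural split on '|'
def splitBar : List Char → List (List Char)
  | [] => [[]]
  | c :: cs =>
    if c = '|' then [] :: splitBar cs
    else match splitBar cs with
         | [] => [[c]]
         | h :: t => (c :: h) :: t

theorem splitBar_ne_nil (cs : List Char) : splitBar cs ≠ [] := by
  cases cs with
  | nil => simp [splitBar]
  | cons c rest =>
    simp only [splitBar]
    split_ifs
    · simp
    · cases h : splitBar rest <;> simp

-- sum of '*'-counts of alternate segments, starting outside (b = false) / inside (b = true)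
def gAux : Bool → List (List Char) → Int
  | _, [] => 0
  | false, h :: t => (h.count '*' : Int) + gAux true t
  | true, _ :: t => gAux false t

theorem loopA_eq_loopB (cs : List Char) : ∀ (lst : List Char) (n : Int),
    ('|' ∉ lst → lst = []) →
    countAsterisksLoopA cs lst n = countAsterisksLoopB cs (decide ('|' ∈ lst)) n := by
  induction cs with
  | nil => intro lst n _; simp [countAsterisksLoopA, countAsterisksLoopB]
  | cons c rest ih =>
    intro lst n hempty
    by_cases hbar : c = '|'
    · subst hbar
      by_cases hmem : '|' ∈ lst
      · simp only [countAsterisksLoopA, countAsterisksLoopB]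
        have := ih [] n (by simp)
        simpa [hmem] using this
      · have hl : lst = [] := hempty hmem
        subst hl
        simp only [countAsterisksLoopA, countAsterisksLoopB]
        have := ih ['|'] n (by simp)
        simpa using this
    · by_cases hmem : '|' ∈ lst
      · have h1 : ¬ (c = '|' ∧ c ∉ lst) := by simp [hbar]
        have h2 : ¬ (c = '|' ∧ c ∈ lst) := by simp [hbar]
        simp only [countAsterisksLoopA, countAsterisksLoopB, h1, h2, if_false, if_pos hmem,
          if_neg hbar]
        have hmem' : '|' ∈ lst ++ [c] := by simp [hmem]
        have := ih (lst ++ [c]) n (by intro h; exact absurd hmem' h)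
        have h3 : ¬ (c = '*' ∧ (decide ('|' ∈ lst)) = false) := by simp [hmem]
        simpa [hmem, hmem', h3] using this
      · have hl : lst = [] := hempty hmem
        subst hl
        simp only [countAsterisksLoopA, countAsterisksLoopB]
        by_cases hst : c = '*'
        · subst hst
          have := ih [] (n + 1) (by simp)
          simpa [hbar] using this
        · have := ih [] n (by simp)
          simpa [hbar, hst] using this

theorem loopB_eq_gAux (cs : List Char) : ∀ (b : Bool) (n : Int),
    countAsterisksLoopB cs b n = n + gAux b (splitBar cs) := by
  induction cs with
  | nil => intro b n; cases b <;> simp [countAsterisksLoopB, splitBar, gAux]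
  | cons c rest ih =>
    intro b n
    by_cases hbar : c = '|'
    · subst hbar
      simp only [countAsterisksLoopB, splitBar, if_pos rfl, ih]
      cases b <;> simp [gAux]
    · obtain ⟨h, t, hsp⟩ : ∃ h t, splitBar rest = h :: t := by
        cases hh : splitBar rest with
        | nil => exact absurd hh (splitBar_ne_nil rest)
        | cons a b => exact ⟨a, b, rfl⟩
      have hsp' : splitBar (c :: rest) = (c :: h) :: t := by
        simp [splitBar, hbar, hsp]
      by_cases hst : c = '*'
      · subst hst
        cases b with
        | false =>
          simp only [countAsterisksLoopB, hsp', gAux, ih, hsp]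
          simp [gAux, List.count_cons, hbar]
          push_cast
          ring
        | true =>
          simp only [countAsterisksLoopB, hsp', gAux, ih, hsp]
          simp [gAux, hbar]
      · cases b with
        | false =>
          simp only [countAsterisksLoopB, hsp', gAux, ih, hsp]
          simp [gAux, List.count_cons, hbar, hst]
        | true =>
          simp only [countAsterisksLoopB, hsp', gAux, ih, hsp]
          simp [gAux, hbar, hst]

-- PySem.Chars.count with sub = ['*'] is List.count '*'
theorem countGo_star (fuel : Nat) : ∀ (l : List Char) (acc : Nat),
    l.length ≤ fuel → PySem.Chars.count.go ['*'] fuel l acc = acc + l.count '*' := by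
  induction fuel with
  | zero =>
    intro l acc hl
    have : l = [] := List.eq_nil_of_length_eq_zero (Nat.le_zero.mp hl)
    subst this
    simp [PySem.Chars.count.go]
  | succ fuel ih =>
    intro l acc hl
    cases l with
    | nil => simp [PySem.Chars.count.go]
    | cons c rest =>
      simp only [PySem.Chars.count.go]
      by_cases hc : c = '*'
      · subst hc
        have hpre : List.isPrefixOf ['*'] ('*' :: rest) = true := by
          simp [List.isPrefixOf]
        rw [if_pos hpre]
        have := ih rest (acc + 1) (by simpa using Nat.le_of_succ_le_succ hl)
        simpa [List.count_cons, Nat.add_assoc, Nat.add_comm, Nat.add_left_comm] using this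
      · have hpre : List.isPrefixOf ['*'] (c :: rest) = false := by
          simp [List.isPrefixOf]
          exact fun h => absurd h.symm hc
        rw [if_neg (by simp [hpre])]
        have := ih rest acc (by simpa using Nat.le_of_succ_le_succ hl)
        simpa [List.count_cons, hc] using this

theorem count_star (l : List Char) : PySem.Chars.count l ['*'] = l.count '*' := by
  simp only [PySem.Chars.count, List.isEmpty, reduceCtorEq, if_false]
  simpa using countGo_star l.length l 0 le_rfl

-- PySem.Chars.splitOn on '|' is splitBar
theorem splitOnGo_bar (fuel : Nat) : ∀ (l cur : List Char) (acc : List (List Char)),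
    l.length ≤ fuel →
    PySem.Chars.splitOn.go ['|'] fuel l cur acc =
      acc.reverse ++ (match splitBar l with
                      | [] => [cur.reverse]
                      | h :: t => (cur.reverse ++ h) :: t) := by
  induction fuel with
  | zero =>
    intro l cur acc hl
    have : l = [] := List.eq_nil_of_length_eq_zero (Nat.le_zero.mp hl)
    subst this
    simp [PySem.Chars.splitOn.go, splitBar]
  | succ fuel ih =>
    intro l cur acc hl
    cases l with
    | nil => simp [PySem.Chars.splitOn.go, splitBar]
    | cons c rest =>
      obtain ⟨h, t, hsp⟩ : ∃ h t, splitBar rest = h :: t := by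
        cases hh : splitBar rest with
        | nil => exact absurd hh (splitBar_ne_nil rest)
        | cons a b => exact ⟨a, b, rfl⟩
      simp only [PySem.Chars.splitOn.go]
      by_cases hc : c = '|'
      · subst hc
        have hpre : List.isPrefixOf ['|'] ('|' :: rest) = true := by
          simp [List.isPrefixOf]
        rw [if_pos hpre]
        have hrec := ih rest [] (cur.reverse :: acc) (by simpa using Nat.le_of_succ_le_succ hl)
        rw [show List.drop (['|'].length) ('|' :: rest) = rest from rfl, hrec, hsp]
        simp [splitBar, hsp]
      · have hpre : List.isPrefixOf ['|'] (c :: rest) = false := by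
          simp [List.isPrefixOf]
          exact fun h => absurd h.symm hc
        rw [if_neg (by simp [hpre])]
        have hrec := ih rest (c :: cur) acc (by simpa using Nat.le_of_succ_le_succ hl)
        rw [hrec, hsp]
        simp [splitBar, hc, hsp]

theorem splitOn_bar (l : List Char) : PySem.Chars.splitOn l ['|'] = splitBar l := by
  obtain ⟨h, t, hsp⟩ : ∃ h t, splitBar l = h :: t := by
    cases hh : splitBar l with
    | nil => exact absurd hh (splitBar_ne_nil l)
    | cons a b => exact ⟨a, b, rfl⟩
  rw [PySem.Chars.splitOn, splitOnGo_bar (l.length + 1) l [] [] (by omega), hsp]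
  simp

-- the filtered-enumerate sum is gAux keyed by the parity of the start index
theorem enumSum_eq_gAux (L : List (List Char)) : ∀ (k : Int), 0 ≤ k →
    (((PySem.List.enumerate L k).filter (fun q => q.1 % 2 == 0)).map
        (fun q => (PySem.Chars.count q.2 ['*'] : Int))).sum
      = gAux (k % 2 == 1) L := by
  induction L with
  | nil => intro k _; simp [PySem.List.enumerate_nil, gAux]
  | cons h t ih =>
    intro k hk
    rw [PySem.List.enumerate_cons]
    by_cases hpar : k % 2 = 0
    · have h2 : (k % 2 == 1) = false := by simp [hpar]
      have h3 : ((k + 1) % 2 == 1) = true := by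
        have : (k + 1) % 2 = 1 := by omega
        simp [this]
      rw [List.filter_cons_of_pos (by simp [hpar]), List.map_cons, List.sum_cons,
        ih (k + 1) (by omega), count_star, h3, h2]
      simp [gAux]
    · have hodd : k % 2 = 1 := by omega
      have h2 : (k % 2 == 1) = true := by simp [hodd]
      have h3 : ((k + 1) % 2 == 1) = false := by
        have : (k + 1) % 2 = 0 := by omega
        simp [this]
      rw [List.filter_cons_of_neg (by simp [hodd]), ih (k + 1) (by omega), h3, h2]
      simp [gAux]

-- ===== VERDICT (by name: the statement is the Claim_ definition above) =====
theorem countAsterisks_spec : Claim_equal_countAsterisks := by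
  intro s _
  unfold Spec_countAsterisks countAsterisks countAsterisks_alt
  rw [loopA_eq_loopB s.toList [] 0 (by simp)]
  simp only [List.not_mem_nil, decide_false]
  rw [loopB_eq_gAux, splitOn_bar, enumSum_eq_gAux _ 0 le_rfl]
  rw [show ((0 : Int) % 2 == 1) = false from by decide]
  simp
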